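-- pv_equiv track=rewrite | github.com/fbv81bp/Parallel_prefix_adders | Kogge-Stone_adder/Studies in Python with AI/kogge-stone_by_me.py | kogge_stone_adder
-- ===== SOURCE A (Python) =====
-- def kogge_stone_adder(A, B, n):
--
--     # Initialize arrays
--     G = [0] * n  # Generate
--     P = [0] * n  # Propagate
--     C = [0] * (n + 1)  # Carry
--
--     # Step 1: Calculate initial generate and propagate
--     for i in range(n):
--         G[i] = A[i] & B[i]
--         P[i] = A[i] ^ B[i]
--
--     # Step 2: Parallel prefix computation (Kogge-Stone)
--     for d in range(n.bit_length() - 1):  # number of stages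
--         for i in range(n - 2**d):
--             G[i + 2**d] = G[i + 2**d] | (P[i + 2**d] & G[i])
--             P[i + 2**d] =                P[i + 2**d] & P[i]
--
--     # Step 3: Calculate the carries
--     for i in range(n):
--         C[i + 1] = G[i]
--
--     # Step 4: Calculate the sum
--     S = [0] * (n + 1)
--     for i in range(n):
--         S[i] =  A[i] ^ B[i] ^ C[i]
--     S[n] = C[n]
--
--     return S
-- ===== SOURCE B (Python) =====
-- def kogge_stone_adder(A, B, n):
--     # Single O(n) ripple pass: the carry recurrence c' = g | (p & c) computes,
--     # bit-position-wise, exactly the prefix generate that A's in-place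
--     # Kogge-Stone stages converge to.
--     c = 0
--     S = []
--     for i in range(n):
--         p = A[i] ^ B[i]
--         S.append(p ^ c)
--         c = (A[i] & B[i]) | (p & c)
--     S.append(c)
--     return S
-- ===== Notes on version B (the rewrite author's own statement) =====
-- stated objective: alternative
-- what changed: Replaces the multi-stage in-place Kogge-Stone prefix network (log n passes of windowed (G,P) combines over freshly allocated G/P/C/S arrays) by a single ripple pass keeping one running carry; exact because A's ascending in-place updates already make its first stage compute the full carry prefix.
import Mathlib
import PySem

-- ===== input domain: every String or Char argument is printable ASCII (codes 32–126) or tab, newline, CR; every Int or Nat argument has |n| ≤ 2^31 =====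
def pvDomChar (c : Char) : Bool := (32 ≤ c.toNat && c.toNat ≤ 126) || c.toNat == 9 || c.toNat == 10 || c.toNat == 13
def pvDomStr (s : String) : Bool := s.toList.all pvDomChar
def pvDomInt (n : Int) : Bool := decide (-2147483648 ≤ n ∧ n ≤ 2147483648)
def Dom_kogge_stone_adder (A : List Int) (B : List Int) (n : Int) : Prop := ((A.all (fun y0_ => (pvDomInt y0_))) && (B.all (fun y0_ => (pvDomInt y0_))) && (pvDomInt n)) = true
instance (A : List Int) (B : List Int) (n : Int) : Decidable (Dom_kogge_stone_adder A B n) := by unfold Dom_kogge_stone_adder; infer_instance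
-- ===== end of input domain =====

-- B replaces A's multi-stage in-place Kogge-Stone prefix network (log n passes over
-- freshly allocated G/P/C/S arrays) by a single ripple pass with one running carry;
-- exact because A's ascending in-place updates already turn its first stage into the
-- full carry prefix (proved below).


-- ===== PORT A =====
-- List accesses A[i]/B[i] are written with getD; inside Pre_ every access is in
-- range, so this matches Python exactly (out-of-range indexing raises IndexError
-- in Python and is excluded by Pre_).
def kogge_stone_adder (A : List Int) (B : List Int) (n : Int) : List Int :=
  -- G = [0]*n ; P = [0]*n ; C = [0]*(n+1)   ([0]*m is empty for m ≤ 0, like toNat)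
  let G0 : List Int := List.replicate n.toNat 0
  let P0 : List Int := List.replicate n.toNat 0
  let C0 : List Int := List.replicate (n + 1).toNat 0
  -- Step 1: initial generate and propagate
  let GP1 :=
    (List.range n.toNat).foldl
      (fun (GP : List Int × List Int) i =>
        (GP.1.set i (PySem.Int.band (A.getD i 0) (B.getD i 0)),
         GP.2.set i (PySem.Int.bxor (A.getD i 0) (B.getD i 0)))) (G0, P0)
  -- Step 2: parallel prefix stages, updating G and P in place
  let GP2 :=
    (List.range (PySem.Int.bitLength n - 1)).foldl
      (fun (GP : List Int × List Int) d =>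
        (List.range (n - 2 ^ d).toNat).foldl
          (fun (GP : List Int × List Int) i =>
            (GP.1.set (i + 2 ^ d)
               (PySem.Int.bor (GP.1.getD (i + 2 ^ d) 0)
                 (PySem.Int.band (GP.2.getD (i + 2 ^ d) 0) (GP.1.getD i 0))),
             GP.2.set (i + 2 ^ d)
               (PySem.Int.band (GP.2.getD (i + 2 ^ d) 0) (GP.2.getD i 0)))) GP) GP1
  -- Step 3: carries
  let C1 :=
    (List.range n.toNat).foldl (fun (C : List Int) i => C.set (i + 1) (GP2.1.getD i 0)) C0
  -- Step 4: sum
  let S0 : List Int := List.replicate (n + 1).toNat 0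
  let S1 :=
    (List.range n.toNat).foldl
      (fun (S : List Int) i =>
        S.set i (PySem.Int.bxor (PySem.Int.bxor (A.getD i 0) (B.getD i 0)) (C1.getD i 0))) S0
  S1.set n.toNat (C1.getD n.toNat 0)

-- ===== PORT B =====
def kogge_stone_adder_alt (A : List Int) (B : List Int) (n : Int) : List Int :=
  let r :=
    (List.range n.toNat).foldl
      (fun (r : List Int × Int) i =>
        let p := PySem.Int.bxor (A.getD i 0) (B.getD i 0)
        (r.1 ++ [PySem.Int.bxor p r.2],
         PySem.Int.bor (PySem.Int.band (A.getD i 0) (B.getD i 0)) (PySem.Int.band p r.2)))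
      ([], 0)
  r.1 ++ [r.2]

-- ===== PRECONDITION & SPEC =====
-- Pre_ excludes exactly the inputs where Python A raises IndexError: n < 0
-- (A then reads C[n]/S[n] of an empty list) or n greater than len(A) or len(B)
-- (A[i]/B[i] out of range in step 1).
def Pre_kogge_stone_adder (A : List Int) (B : List Int) (n : Int) : Prop :=
  0 ≤ n ∧ n ≤ (A.length : Int) ∧ n ≤ (B.length : Int)
instance (A : List Int) (B : List Int) (n : Int) : Decidable (Pre_kogge_stone_adder A B n) := by
  unfold Pre_kogge_stone_adder; infer_instance
def pvWitness_kogge_stone_adder : List Int × List Int × Int := ([1, 2, 3], [5, 6, 7], 3)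

def Spec_kogge_stone_adder (A : List Int) (B : List Int) (n : Int) (out : List Int) : Prop :=
  out = kogge_stone_adder_alt A B n
instance (A : List Int) (B : List Int) (n : Int) (out : List Int) :
    Decidable (Spec_kogge_stone_adder A B n out) := by unfold Spec_kogge_stone_adder; infer_instance

-- ===== CLAIM (what is proved, stated in full; the proofs are below) =====
def Claim_equal_kogge_stone_adder : Prop := ∀ (A : List Int) (B : List Int) (n : Int), Dom_kogge_stone_adder A B n → Pre_kogge_stone_adder A B n → Spec_kogge_stone_adder A B n (kogge_stone_adder A B n)

-- ===== LEMMAS AND PROOFS =====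

-- generate / propagate bits, the running carry, and the propagate prefix
def ksg (A B : List Int) (i : Nat) : Int := PySem.Int.band (A.getD i 0) (B.getD i 0)
def ksp (A B : List Int) (i : Nat) : Int := PySem.Int.bxor (A.getD i 0) (B.getD i 0)
def kscarry (A B : List Int) : Nat → Int
  | 0 => 0
  | i + 1 => PySem.Int.bor (ksg A B i) (PySem.Int.band (ksp A B i) (kscarry A B i))
def kspref (A B : List Int) : Nat → Int
  | 0 => ksp A B 0
  | i + 1 => PySem.Int.band (ksp A B (i + 1)) (kspref A B i)

theorem pair_eq {α β : Type} {a c : α} {b d : β} (h1 : a = c) (h2 : b = d) :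
    (a, b) = (c, d) := by rw [h1, h2]

-- ---- bit-level toolkit ----

theorem int_testBit_ext (a b : Int) (h : ∀ k, a.testBit k = b.testBit k) : a = b := by
  have bound : ∀ (m nn : Nat), Nat.testBit m (m + nn) = false := fun m nn =>
    Nat.testBit_lt_two_pow
      (lt_of_lt_of_le Nat.lt_two_pow_self (Nat.pow_le_pow_right (by norm_num) (by omega)))
  cases a with
  | ofNat m =>
    cases b with
    | ofNat nn =>
      exact congrArg Int.ofNat (Nat.eq_of_testBit_eq fun i => by simpa [Int.testBit] using h i)
    | negSucc nn =>
      exfalso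
      have hm := bound m nn
      have hn : Nat.testBit nn (m + nn) = false := by
        have := bound nn m; simpa [Nat.add_comm] using this
      have := h (m + nn)
      simp [Int.testBit, hm, hn] at this
  | negSucc m =>
    cases b with
    | ofNat nn =>
      exfalso
      have hm := bound m nn
      have hn : Nat.testBit nn (m + nn) = false := by
        have := bound nn m; simpa [Nat.add_comm] using this
      have := h (m + nn)
      simp [Int.testBit, hm, hn] at this
    | negSucc nn =>
      have : m = nn := Nat.eq_of_testBit_eq fun i => by
        have := h i; simpa [Int.testBit] using this
      simp [this]

theorem nat_add_of_and_eq_zero (x : Nat) : ∀ y, x &&& y = 0 → x + y = x ||| y := by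
  induction x using Nat.strong_induction_on with
  | _ x ih =>
    intro y h
    rcases Nat.eq_zero_or_pos x with hx | hx
    · subst hx; simp
    · have hdiv : x / 2 &&& y / 2 = 0 := by
        have h2 := Nat.and_div_two (a := x) (b := y)
        rw [h, Nat.zero_div] at h2
        exact h2.symm
      have ih2 : x / 2 + y / 2 = x / 2 ||| y / 2 :=
        ih (x / 2) (Nat.div_lt_self hx (by norm_num)) (y / 2) hdiv
      have hor2 : (x ||| y) / 2 = x / 2 ||| y / 2 := Nat.or_div_two
      have hpar : ¬(x % 2 = 1 ∧ y % 2 = 1) := by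
        intro hc
        have h1 : (x &&& y) % 2 = 1 := Nat.and_mod_two_eq_one.mpr hc
        rw [h] at h1; simp at h1
      rcases Nat.mod_two_eq_zero_or_one x with hx2 | hx2 <;>
        rcases Nat.mod_two_eq_zero_or_one y with hy2 | hy2
      · have hv : (x ||| y) % 2 = 0 := by
          rcases Nat.mod_two_eq_zero_or_one (x ||| y) with hv | hv
          · exact hv
          · rcases Nat.or_mod_two_eq_one.mp hv with h1 | h1 <;> omega
        omega
      · have hv : (x ||| y) % 2 = 1 := Nat.or_mod_two_eq_one.mpr (Or.inr hy2)
        omega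
      · have hv : (x ||| y) % 2 = 1 := Nat.or_mod_two_eq_one.mpr (Or.inl hx2)
        omega
      · exact absurd ⟨hx2, hy2⟩ hpar

theorem nat_sub_and (m n : Nat) : m - (m &&& n) = m.ldiff n := by
  have hd : (m &&& n) &&& m.ldiff n = 0 := Nat.eq_of_testBit_eq fun i => by
    simp only [Nat.testBit_and, Nat.testBit_ldiff, Nat.zero_testBit]
    cases m.testBit i <;> cases n.testBit i <;> rfl
  have ho : (m &&& n) ||| m.ldiff n = m := Nat.eq_of_testBit_eq fun i => by
    simp only [Nat.testBit_or, Nat.testBit_and, Nat.testBit_ldiff]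
    cases m.testBit i <;> cases n.testBit i <;> rfl
  have hle : m &&& n ≤ m := Nat.and_le_left
  have hadd := nat_add_of_and_eq_zero (m &&& n) (m.ldiff n) hd
  omega

theorem neg_sub_one_toNat (nn : Nat) : (-(Int.negSucc nn) - 1).toNat = nn := by
  rw [Int.neg_negSucc]; omega

theorem negCast_sub_one (k : Nat) : -(k : Int) - 1 = Int.negSucc k := by
  rw [Int.negSucc_eq]; ring

theorem band_eq_land (a b : Int) : PySem.Int.band a b = Int.land a b := by
  cases a with
  | ofNat m =>
    cases b with
    | ofNat nn =>
      simp [PySem.Int.band]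
      rfl
    | negSucc nn =>
      have hb : ¬(0 ≤ Int.negSucc nn) := not_le.mpr (Int.negSucc_lt_zero nn)
      simp [PySem.Int.band, hb, neg_sub_one_toNat]
      rw [nat_sub_and]
      rfl
  | negSucc m =>
    have ha : ¬(0 ≤ Int.negSucc m) := not_le.mpr (Int.negSucc_lt_zero m)
    cases b with
    | ofNat nn =>
      simp [PySem.Int.band, ha, neg_sub_one_toNat]
      rw [nat_sub_and]
      rfl
    | negSucc nn =>
      have hb : ¬(0 ≤ Int.negSucc nn) := not_le.mpr (Int.negSucc_lt_zero nn)
      simp [PySem.Int.band, ha, hb, neg_sub_one_toNat]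
      rw [negCast_sub_one]
      rfl

theorem bor_eq_lor (a b : Int) : PySem.Int.bor a b = Int.lor a b := by
  cases a with
  | ofNat m =>
    cases b with
    | ofNat nn =>
      simp [PySem.Int.bor]
      rfl
    | negSucc nn =>
      have hb : ¬(0 ≤ Int.negSucc nn) := not_le.mpr (Int.negSucc_lt_zero nn)
      simp [PySem.Int.bor, hb, neg_sub_one_toNat]
      rw [nat_sub_and, negCast_sub_one]
      rfl
  | negSucc m =>
    have ha : ¬(0 ≤ Int.negSucc m) := not_le.mpr (Int.negSucc_lt_zero m)
    cases b with
    | ofNat nn =>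
      simp [PySem.Int.bor, ha, neg_sub_one_toNat]
      rw [nat_sub_and, negCast_sub_one]
      rfl
    | negSucc nn =>
      have hb : ¬(0 ≤ Int.negSucc nn) := not_le.mpr (Int.negSucc_lt_zero nn)
      simp [PySem.Int.bor, ha, hb, neg_sub_one_toNat]
      rw [negCast_sub_one]
      rfl

theorem pband_assoc (x y z : Int) :
    PySem.Int.band (PySem.Int.band x y) z = PySem.Int.band x (PySem.Int.band y z) := by
  simp only [band_eq_land]
  exact int_testBit_ext _ _ fun k => by
    simp [Int.testBit_land, Bool.and_assoc]

theorem pbor_absorb (c w : Int) : PySem.Int.bor c (PySem.Int.band w c) = c := by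
  rw [bor_eq_lor, band_eq_land]
  exact int_testBit_ext _ _ fun k => by
    rw [Int.testBit_lor, Int.testBit_land]
    cases c.testBit k <;> cases w.testBit k <;> rfl

theorem pbor_absorb2 (x y c q : Int) (h : PySem.Int.bor c q = c) :
    PySem.Int.bor (PySem.Int.bor x (PySem.Int.band y c)) (PySem.Int.band y q)
      = PySem.Int.bor x (PySem.Int.band y c) := by
  rw [bor_eq_lor] at h
  simp only [bor_eq_lor, band_eq_land]
  apply int_testBit_ext
  intro k
  have hk : (c.testBit k || q.testBit k) = c.testBit k := by rw [← Int.testBit_lor, h]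
  simp only [Int.testBit_lor, Int.testBit_land]
  cases hx : x.testBit k <;> cases hy : y.testBit k <;> cases hc : c.testBit k <;>
    cases hq : q.testBit k <;> simp_all

-- ---- carry / prefix algebra ----

theorem kspref_and (A B : List Int) (i j : Nat) (h : i ≤ j) :
    PySem.Int.band (kspref A B j) (kspref A B i) = kspref A B j := by
  induction j, h using Nat.le_induction with
  | base => exact PySem.Int.band_self _
  | succ j hij ihj =>
    show PySem.Int.band (PySem.Int.band (ksp A B (j + 1)) (kspref A B j)) (kspref A B i) = _
    rw [pband_assoc, ihj]
    rfl

theorem kscarry_absorb (A B : List Int) (i j : Nat) (h : i ≤ j) :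
    PySem.Int.bor (kscarry A B (j + 1))
      (PySem.Int.band (kspref A B j) (kscarry A B (i + 1))) = kscarry A B (j + 1) := by
  induction j, h using Nat.le_induction with
  | base => exact pbor_absorb _ _
  | succ j hij ihj =>
    show PySem.Int.bor
        (PySem.Int.bor (ksg A B (j + 1)) (PySem.Int.band (ksp A B (j + 1)) (kscarry A B (j + 1))))
        (PySem.Int.band (PySem.Int.band (ksp A B (j + 1)) (kspref A B j)) (kscarry A B (i + 1))) = _
    rw [pband_assoc]
    exact pbor_absorb2 _ _ _ _ ihj

-- ---- list toolkit ----

theorem rep_eq_map (M : Nat) : List.replicate M (0 : Int) = (List.range M).map fun _ => 0 := by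
  apply List.ext_getElem
  · simp
  · intro k h1 h2
    simp

theorem getD_map_range (N i : Nat) (f : Nat → Int) (d : Int) (h : i < N) :
    ((List.range N).map f).getD i d = f i := by
  have hlen : i < ((List.range N).map f).length := by simpa using h
  rw [List.getD_eq_getElem?_getD, List.getElem?_eq_getElem hlen]
  simp only [Option.getD_some, List.getElem_map, List.getElem_range]

theorem set_map_range (N i : Nat) (f : Nat → Int) (x : Int) (h : i < N) :
    ((List.range N).map f).set i x = (List.range N).map fun j => if j = i then x else f j := by
  apply List.ext_getElem
  · simp
  · intro k h1 h2
    simp only [List.getElem_set, List.getElem_map, List.getElem_range]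
    split_ifs with h3 h4 h4 <;> first | rfl | (exfalso; omega)

theorem map_range_congr (N : Nat) (f g : Nat → Int) (h : ∀ j, j < N → f j = g j) :
    (List.range N).map f = (List.range N).map g :=
  List.map_congr_left fun a ha => h a (List.mem_range.mp ha)

theorem set_map_range_self (N i : Nat) (f : Nat → Int) :
    ((List.range N).map f).set i (f i) = (List.range N).map f := by
  rcases lt_or_ge i N with h | h
  · rw [set_map_range N i f (f i) h]
    apply map_range_congr
    intro j hj
    split_ifs with hji
    · subst hji; rfl
    · rfl
  · exact List.set_eq_of_length_le (by simpa using h)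

theorem foldl_fixed' {α β : Type} (l : List β) (step : α → β → α) (s : α)
    (h : ∀ x ∈ l, step s x = s) : l.foldl step s = s := by
  induction l with
  | nil => rfl
  | cons a l ih =>
    rw [List.foldl_cons, h a List.mem_cons_self]
    exact ih fun x hx => h x (List.mem_cons_of_mem _ hx)

theorem foldl_pair_split {γ : Type} (l : List γ) (f1 : List Int → γ → List Int)
    (f2 : List Int → γ → List Int) (s1 s2 : List Int) :
    l.foldl (fun (s : List Int × List Int) x => (f1 s.1 x, f2 s.2 x)) (s1, s2)
      = (l.foldl f1 s1, l.foldl f2 s2) := by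
  induction l generalizing s1 s2 with
  | nil => rfl
  | cons a l ih => simp [List.foldl_cons, ih]

theorem foldl_set_range (M off : Nat) (v : Nat → Int) (f : Nat → Int) :
    ∀ k, k + off ≤ M →
      (List.range k).foldl (fun (L : List Int) i => L.set (i + off) (v i))
          ((List.range M).map f)
        = (List.range M).map fun j => if off ≤ j ∧ j < k + off then v (j - off) else f j := by
  intro k
  induction k with
  | zero =>
    intro _
    apply Eq.symm
    apply map_range_congr
    intro j hj
    rw [if_neg (by omega)]
  | succ k ih =>
    intro hk
    rw [List.range_succ, List.foldl_append, ih (by omega), List.foldl_cons, List.foldl_nil,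
      set_map_range M (k + off) _ _ (by omega)]
    apply map_range_congr
    intro j hj
    dsimp only
    by_cases h1 : j = k + off
    · rw [if_pos h1, if_pos (by omega)]
      subst h1
      congr 1
      omega
    · rw [if_neg h1]
      by_cases h2 : off ≤ j ∧ j < k + off
      · rw [if_pos h2, if_pos (by omega)]
      · rw [if_neg h2, if_neg (by omega)]

-- ---- step 1 ----

theorem step1_eq (A B : List Int) (N : Nat) :
    (List.range N).foldl
        (fun (GP : List Int × List Int) i =>
          (GP.1.set i (PySem.Int.band (A.getD i 0) (B.getD i 0)),
           GP.2.set i (PySem.Int.bxor (A.getD i 0) (B.getD i 0))))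
        (List.replicate N 0, List.replicate N 0)
      = ((List.range N).map (ksg A B), (List.range N).map (ksp A B)) := by
  rw [rep_eq_map]
  refine Eq.trans (foldl_pair_split (List.range N)
    (fun L i => L.set i (PySem.Int.band (A.getD i 0) (B.getD i 0)))
    (fun L i => L.set i (PySem.Int.bxor (A.getD i 0) (B.getD i 0))) _ _) ?_
  refine pair_eq ?_ ?_ <;>
  · refine Eq.trans (foldl_set_range N 0 _ (fun _ => 0) N (by omega)) ?_
    apply map_range_congr
    intro j hj
    dsimp only
    rw [if_pos (by omega), Nat.sub_zero]
    rfl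

-- ---- step 2 ----

theorem pass0_eq (A B : List Int) (N : Nat) :
    ∀ k, k < N →
      (List.range k).foldl
          (fun (GP : List Int × List Int) i =>
            (GP.1.set (i + 2 ^ 0)
               (PySem.Int.bor (GP.1.getD (i + 2 ^ 0) 0)
                 (PySem.Int.band (GP.2.getD (i + 2 ^ 0) 0) (GP.1.getD i 0))),
             GP.2.set (i + 2 ^ 0)
               (PySem.Int.band (GP.2.getD (i + 2 ^ 0) 0) (GP.2.getD i 0))))
          ((List.range N).map (ksg A B), (List.range N).map (ksp A B))
        = ((List.range N).map fun j => if j ≤ k then kscarry A B (j + 1) else ksg A B j,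
           (List.range N).map fun j => if j ≤ k then kspref A B j else ksp A B j) := by
  intro k
  induction k with
  | zero =>
    intro _
    rw [List.range_zero, List.foldl_nil]
    refine pair_eq ?_ ?_ <;> (apply map_range_congr; intro j hj; dsimp only; by_cases h0 : j = 0)
    · subst h0
      rw [if_pos (by omega)]
      show ksg A B 0 = PySem.Int.bor (ksg A B 0) (PySem.Int.band (ksp A B 0) (kscarry A B 0))
      rw [show kscarry A B 0 = 0 from rfl, PySem.Int.band_zero, PySem.Int.bor_zero]
    · rw [if_neg (by omega)]
    · subst h0
      rw [if_pos (by omega)]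
      rfl
    · rw [if_neg (by omega)]
  | succ k ih =>
    intro hk
    rw [List.range_succ, List.foldl_append, ih (by omega), List.foldl_cons, List.foldl_nil]
    dsimp only
    have e1 : k + 2 ^ 0 = k + 1 := rfl
    have hg1 : ((List.range N).map fun j => if j ≤ k then kscarry A B (j + 1) else ksg A B j).getD (k + 1) 0
        = ksg A B (k + 1) := by
      rw [getD_map_range N (k + 1) _ 0 (by omega), if_neg (by omega)]
    have hg0 : ((List.range N).map fun j => if j ≤ k then kscarry A B (j + 1) else ksg A B j).getD k 0
        = kscarry A B (k + 1) := by
      rw [getD_map_range N k _ 0 (by omega), if_pos (by omega)]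
    have hp1 : ((List.range N).map fun j => if j ≤ k then kspref A B j else ksp A B j).getD (k + 1) 0
        = ksp A B (k + 1) := by
      rw [getD_map_range N (k + 1) _ 0 (by omega), if_neg (by omega)]
    have hp0 : ((List.range N).map fun j => if j ≤ k then kspref A B j else ksp A B j).getD k 0
        = kspref A B k := by
      rw [getD_map_range N k _ 0 (by omega), if_pos (by omega)]
    simp only [e1, hg1, hg0, hp1, hp0]
    rw [set_map_range N (k + 1) _ _ (by omega), set_map_range N (k + 1) _ _ (by omega)]
    refine pair_eq ?_ ?_ <;> (apply map_range_congr; intro j hj; dsimp only)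
    · by_cases h1 : j = k + 1
      · subst h1
        rw [if_pos rfl, if_pos (by omega)]
        rfl
      · rw [if_neg h1]
        by_cases h2 : j ≤ k
        · rw [if_pos h2, if_pos (by omega)]
        · rw [if_neg h2, if_neg (by omega)]
    · by_cases h1 : j = k + 1
      · subst h1
        rw [if_pos rfl, if_pos (by omega)]
        rfl
      · rw [if_neg h1]
        by_cases h2 : j ≤ k
        · rw [if_pos h2, if_pos (by omega)]
        · rw [if_neg h2, if_neg (by omega)]

theorem stage_noop (A B : List Int) (n : Int) (hn : 0 ≤ n) (d : Nat) :
    (List.range (n - 2 ^ d).toNat).foldl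
        (fun (GP : List Int × List Int) i =>
          (GP.1.set (i + 2 ^ d)
             (PySem.Int.bor (GP.1.getD (i + 2 ^ d) 0)
               (PySem.Int.band (GP.2.getD (i + 2 ^ d) 0) (GP.1.getD i 0))),
           GP.2.set (i + 2 ^ d)
             (PySem.Int.band (GP.2.getD (i + 2 ^ d) 0) (GP.2.getD i 0))))
        ((List.range n.toNat).map fun j => kscarry A B (j + 1),
         (List.range n.toNat).map (kspref A B))
      = ((List.range n.toNat).map fun j => kscarry A B (j + 1),
         (List.range n.toNat).map (kspref A B)) := by
  apply foldl_fixed'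
  intro i hi
  rw [List.mem_range] at hi
  have key : ∀ q : Nat, (q : Int) = (2 : Int) ^ d → i + q < n.toNat ∧ i < n.toNat := by
    intro q hq
    omega
  obtain ⟨hiN, hilow⟩ := key (2 ^ d) (by push_cast; ring)
  have hg1 : ((List.range n.toNat).map fun j => kscarry A B (j + 1)).getD (i + 2 ^ d) 0
      = kscarry A B (i + 2 ^ d + 1) := getD_map_range _ _ _ _ hiN
  have hg0 : ((List.range n.toNat).map fun j => kscarry A B (j + 1)).getD i 0
      = kscarry A B (i + 1) := getD_map_range n.toNat i _ 0 hilow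
  have hp1 : ((List.range n.toNat).map (kspref A B)).getD (i + 2 ^ d) 0
      = kspref A B (i + 2 ^ d) := getD_map_range _ _ _ _ hiN
  have hp0 : ((List.range n.toNat).map (kspref A B)).getD i 0
      = kspref A B i := getD_map_range n.toNat i _ 0 hilow
  dsimp only
  rw [hg1, hg0, hp1, hp0,
    kscarry_absorb A B i (i + 2 ^ d) (Nat.le_add_right i (2 ^ d)),
    kspref_and A B i (i + 2 ^ d) (Nat.le_add_right i (2 ^ d)),
    set_map_range_self, set_map_range_self]

theorem step2_eq (A B : List Int) (n : Int) (hn : 0 ≤ n) :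
    (List.range (PySem.Int.bitLength n - 1)).foldl
        (fun (GP : List Int × List Int) d =>
          (List.range (n - 2 ^ d).toNat).foldl
            (fun (GP : List Int × List Int) i =>
              (GP.1.set (i + 2 ^ d)
                 (PySem.Int.bor (GP.1.getD (i + 2 ^ d) 0)
                   (PySem.Int.band (GP.2.getD (i + 2 ^ d) 0) (GP.1.getD i 0))),
               GP.2.set (i + 2 ^ d)
                 (PySem.Int.band (GP.2.getD (i + 2 ^ d) 0) (GP.2.getD i 0)))) GP)
        ((List.range n.toNat).map (ksg A B), (List.range n.toNat).map (ksp A B))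
      = ((List.range n.toNat).map fun j => kscarry A B (j + 1),
         (List.range n.toNat).map (kspref A B)) := by
  by_cases hsmall : n.toNat ≤ 1
  · have hbl : PySem.Int.bitLength n - 1 = 0 := by
      have h01 : n = 0 ∨ n = 1 := by omega
      rcases h01 with h | h <;> subst h <;> decide
    rw [hbl, List.range_zero, List.foldl_nil]
    refine pair_eq ?_ ?_ <;> (apply map_range_congr; intro j hj)
    · have hj0 : j = 0 := by omega
      subst hj0
      show ksg A B 0 = PySem.Int.bor (ksg A B 0) (PySem.Int.band (ksp A B 0) (kscarry A B 0))
      rw [show kscarry A B 0 = 0 from rfl, PySem.Int.band_zero, PySem.Int.bor_zero]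
    · have hj0 : j = 0 := by omega
      subst hj0
      rfl
  · -- n.toNat ≥ 2: the first stage (d = 0) already produces the full carry prefix,
    -- every later stage is a no-op.
    have hbl2 : 2 ≤ PySem.Int.bitLength n := by
      by_contra hlt
      have h1 := PySem.Int.lt_two_pow_bitLength n
      have h2 : PySem.Int.bitLength n ≤ 1 := by omega
      have h3 : n.natAbs < 2 ^ 1 :=
        lt_of_lt_of_le h1 (Nat.pow_le_pow_right (by norm_num) h2)
      omega
    obtain ⟨m', hm'⟩ : ∃ m', PySem.Int.bitLength n - 1 = m' + 1 :=
      ⟨PySem.Int.bitLength n - 2, by omega⟩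
    rw [hm', List.range_succ_eq_map, List.foldl_cons]
    have hcnt : (n - 2 ^ (0 : Nat)).toNat = n.toNat - 1 := by
      simp only [pow_zero]
      omega
    have hfirst :
        (List.range (n - 2 ^ (0 : Nat)).toNat).foldl
            (fun (GP : List Int × List Int) i =>
              (GP.1.set (i + 2 ^ (0 : Nat))
                 (PySem.Int.bor (GP.1.getD (i + 2 ^ (0 : Nat)) 0)
                   (PySem.Int.band (GP.2.getD (i + 2 ^ (0 : Nat)) 0) (GP.1.getD i 0))),
               GP.2.set (i + 2 ^ (0 : Nat))
                 (PySem.Int.band (GP.2.getD (i + 2 ^ (0 : Nat)) 0) (GP.2.getD i 0))))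
            ((List.range n.toNat).map (ksg A B), (List.range n.toNat).map (ksp A B))
          = ((List.range n.toNat).map fun j => kscarry A B (j + 1),
             (List.range n.toNat).map (kspref A B)) := by
      rw [hcnt, pass0_eq A B n.toNat (n.toNat - 1) (by omega)]
      refine pair_eq ?_ ?_ <;>
        (apply map_range_congr; intro j hj; dsimp only; rw [if_pos (by omega)])
    rw [hfirst]
    apply foldl_fixed'
    intro d hd
    exact stage_noop A B n hn d

-- ---- steps 3 and 4, and the final shape of A's result ----

theorem A_eq (A B : List Int) (n : Int) (hn : 0 ≤ n) :
    kogge_stone_adder A B n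
      = ((List.range n.toNat).map fun j => PySem.Int.bxor (ksp A B j) (kscarry A B j))
          ++ [kscarry A B n.toNat] := by
  simp only [kogge_stone_adder]
  rw [step1_eq, step2_eq A B n hn]
  dsimp only
  have hN1 : (n + 1).toNat = n.toNat + 1 := by omega
  -- step 3 builds C = map kscarry over range (N+1)
  have hC : (List.range n.toNat).foldl
      (fun (C : List Int) i =>
        C.set (i + 1) (((List.range n.toNat).map fun j => kscarry A B (j + 1)).getD i 0))
      (List.replicate (n + 1).toNat 0)
      = (List.range (n.toNat + 1)).map (kscarry A B) := by
    rw [hN1, rep_eq_map]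
    refine Eq.trans (foldl_set_range (n.toNat + 1) 1
      (fun i => ((List.range n.toNat).map fun j => kscarry A B (j + 1)).getD i 0)
      (fun _ => 0) n.toNat (by omega)) ?_
    apply map_range_congr
    intro j hj
    dsimp only
    by_cases h1 : 1 ≤ j ∧ j < n.toNat + 1
    · rw [if_pos h1, getD_map_range _ _ _ _ (by omega)]
      congr 1
      omega
    · rw [if_neg h1]
      have hj0 : j = 0 := by omega
      subst hj0
      rfl
  rw [hC]
  -- step 4
  have hS : (List.range n.toNat).foldl
      (fun (S : List Int) i =>
        S.set i (PySem.Int.bxor (PySem.Int.bxor (A.getD i 0) (B.getD i 0))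
          (((List.range (n.toNat + 1)).map (kscarry A B)).getD i 0)))
      (List.replicate (n + 1).toNat 0)
      = (List.range (n.toNat + 1)).map
          fun j => if j < n.toNat then PySem.Int.bxor (ksp A B j) (kscarry A B j) else 0 := by
    rw [hN1, rep_eq_map]
    refine Eq.trans (foldl_set_range (n.toNat + 1) 0
      (fun i => PySem.Int.bxor (PySem.Int.bxor (A.getD i 0) (B.getD i 0))
        (((List.range (n.toNat + 1)).map (kscarry A B)).getD i 0))
      (fun _ => 0) n.toNat (by omega)) ?_
    apply map_range_congr
    intro j hj
    dsimp only
    by_cases h1 : j < n.toNat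
    · rw [if_pos (by omega), if_pos h1, getD_map_range _ _ _ _ (by omega)]
      rfl
    · rw [if_neg (by omega), if_neg h1]
  rw [hS]
  have hlast : ((List.range (n.toNat + 1)).map (kscarry A B)).getD n.toNat 0
      = kscarry A B n.toNat := getD_map_range _ _ _ _ (by omega)
  rw [hlast, set_map_range (n.toNat + 1) n.toNat _ _ (by omega),
    List.range_succ, List.map_append]
  congr 1
  · apply map_range_congr
    intro j hj
    dsimp only
    rw [if_neg (by omega), if_pos hj]
  · simp

-- ---- B's loop ----

theorem alt_loop (A B : List Int) :
    ∀ k, (List.range k).foldl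
        (fun (r : List Int × Int) i =>
          let p := PySem.Int.bxor (A.getD i 0) (B.getD i 0)
          (r.1 ++ [PySem.Int.bxor p r.2],
           PySem.Int.bor (PySem.Int.band (A.getD i 0) (B.getD i 0)) (PySem.Int.band p r.2)))
        ([], 0)
      = ((List.range k).map fun j => PySem.Int.bxor (ksp A B j) (kscarry A B j), kscarry A B k) := by
  intro k
  induction k with
  | zero => rfl
  | succ k ih =>
    rw [List.range_succ, List.foldl_append, ih, List.foldl_cons, List.foldl_nil, List.map_append]
    rfl

theorem B_eq (A B : List Int) (n : Int) :
    kogge_stone_adder_alt A B n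
      = ((List.range n.toNat).map fun j => PySem.Int.bxor (ksp A B j) (kscarry A B j))
          ++ [kscarry A B n.toNat] := by
  simp only [kogge_stone_adder_alt]
  rw [alt_loop]

-- ===== VERDICT (by name: the statement is the Claim_ definition above) =====
theorem kogge_stone_adder_spec : Claim_equal_kogge_stone_adder := by
  intro A B n _ hpre
  unfold Spec_kogge_stone_adder
  rw [A_eq A B n hpre.1, B_eq]
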